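-- pv_equiv track=rewrite | github.com/aeon0/d4lf | src/tts.py | has_more_than_consecutive_capitals
-- ===== SOURCE A (Python) =====
-- def has_more_than_consecutive_capitals(s, n=5):
--     capital_count = 0
--     for char in s:
--         if char.isupper():
--             capital_count += 1
--             if capital_count > n:
--                 return True
--         else:
--             capital_count = 0
--     return False
-- ===== SOURCE B (Python) =====
-- def has_more_than_consecutive_capitals(s, n=5):
--     # run-partition decomposition: scan maximal uppercase runs and measure each
--     i, L = 0, len(s)
--     while i < L:
--         if s[i].isupper():
--             j = i
--             while j < L and s[j].isupper():
--                 j += 1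
--             if j - i > n:
--                 return True
--             i = j
--         else:
--             i += 1
--     return False
-- ===== Notes on version B (the rewrite author's own statement) =====
-- stated objective: alternative
-- what changed: Replaced the running counter-with-reset by a run-partition scan: find each maximal run of consecutive uppercase characters with an inner scan and compare its full length to n.
import Mathlib
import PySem

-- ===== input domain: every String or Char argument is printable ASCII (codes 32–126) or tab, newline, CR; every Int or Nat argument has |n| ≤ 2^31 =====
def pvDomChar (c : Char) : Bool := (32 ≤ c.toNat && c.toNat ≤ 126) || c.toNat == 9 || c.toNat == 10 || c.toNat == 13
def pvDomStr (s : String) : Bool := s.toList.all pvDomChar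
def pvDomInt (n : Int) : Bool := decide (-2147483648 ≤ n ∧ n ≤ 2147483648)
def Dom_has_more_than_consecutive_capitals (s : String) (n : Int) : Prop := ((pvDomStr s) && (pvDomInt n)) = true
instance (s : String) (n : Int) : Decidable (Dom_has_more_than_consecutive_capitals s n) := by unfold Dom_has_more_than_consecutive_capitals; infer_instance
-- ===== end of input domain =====

-- B replaces A's running counter-with-reset by a run-partition scan (measure each maximal uppercase run); alternative decomposition, same cost.

-- ===== PORT A =====
-- the for-loop with the running counter, early return via the Bool result
def pvALoop (n : Int) (capital_count : Int) : List Char → Bool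
  | [] => false
  | ch :: rest =>
    if PySem.Chars.isupper ch then
      if capital_count + 1 > n then true
      else pvALoop n (capital_count + 1) rest
    else pvALoop n 0 rest

def has_more_than_consecutive_capitals (s : String) (n : Int) : Bool :=
  pvALoop n 0 s.toList

-- ===== PORT B =====
-- run-partition scan: on an uppercase char, the inner scan (takeWhile) measures the
-- whole maximal run; compare its length to n, then continue after the run (dropWhile)
def pvBLoop (n : Int) : List Char → Bool
  | [] => false
  | ch :: rest =>
    if PySem.Chars.isupper ch then
      if ((((ch :: rest).takeWhile PySem.Chars.isupper).length : Int)) > n then true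
      else pvBLoop n ((ch :: rest).dropWhile PySem.Chars.isupper)
    else pvBLoop n rest
  termination_by cs => cs.length
  decreasing_by
    · simp_all
      exact List.length_dropWhile_le _ _
    · simp

def has_more_than_consecutive_capitals_alt (s : String) (n : Int) : Bool :=
  pvBLoop n s.toList

-- ===== PRECONDITION & SPEC =====
def Spec_has_more_than_consecutive_capitals (s : String) (n : Int) (out : Bool) : Prop := out = has_more_than_consecutive_capitals_alt s n
instance (s : String) (n : Int) (out : Bool) : Decidable (Spec_has_more_than_consecutive_capitals s n out) := by unfold Spec_has_more_than_consecutive_capitals; infer_instance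

-- ===== CLAIM (what is proved, stated in full; the proofs are below) =====
def Claim_equal_has_more_than_consecutive_capitals : Prop := ∀ (s : String) (n : Int), Dom_has_more_than_consecutive_capitals s n → Spec_has_more_than_consecutive_capitals s n (has_more_than_consecutive_capitals s n)

-- ===== LEMMAS AND PROOFS =====

-- B's loop, restated through the head run (the form the A-side invariant produces)
theorem pvBLoop_run (n : Int) (cs : List Char) :
    pvBLoop n cs =
      ((decide ((cs.takeWhile PySem.Chars.isupper) ≠ []) &&
        decide ((((cs.takeWhile PySem.Chars.isupper).length : Int)) > n)) ||
       pvBLoop n (cs.dropWhile PySem.Chars.isupper)) := by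
  match cs with
  | [] => simp [pvBLoop]
  | ch :: rest =>
    by_cases h : PySem.Chars.isupper ch
    · rw [pvBLoop]
      simp only [h, if_true, List.takeWhile_cons, List.dropWhile_cons,
        ne_eq, reduceCtorEq, not_false_eq_true, decide_true, Bool.true_and]
      split_ifs with hlt
      · have h2 : decide ((((ch :: rest.takeWhile PySem.Chars.isupper).length : Nat) : Int) > n) = true := by
          rw [decide_eq_true_eq]; exact hlt
        rw [h2]; simp
      · have h2 : decide ((((ch :: rest.takeWhile PySem.Chars.isupper).length : Nat) : Int) > n) = false := by
          rw [decide_eq_false_iff_not]; exact hlt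
        rw [h2]; simp
    · conv_lhs => rw [pvBLoop]
      conv_rhs => rw [pvBLoop.eq_def]
      simp [h]

-- invariant of A's counter loop: with counter c it answers "the head uppercase run,
-- credited with c, exceeds n — or B's run scan succeeds after that run"
theorem pvALoop_eq (n : Int) (cs : List Char) (c : Int) :
    pvALoop n c cs =
      ((decide ((cs.takeWhile PySem.Chars.isupper) ≠ []) &&
        decide (c + (((cs.takeWhile PySem.Chars.isupper).length : Int)) > n)) ||
       pvBLoop n (cs.dropWhile PySem.Chars.isupper)) := by
  induction cs generalizing c with
  | nil => simp [pvALoop, pvBLoop]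
  | cons ch rest ih =>
    by_cases h : PySem.Chars.isupper ch
    · rw [pvALoop]
      simp only [h, if_true, List.takeWhile_cons, List.dropWhile_cons,
        ne_eq, reduceCtorEq, not_false_eq_true, decide_true, Bool.true_and,
        List.length_cons]
      have hge : (0 : Int) ≤ ((rest.takeWhile PySem.Chars.isupper).length : Int) :=
        Int.natCast_nonneg _
      split_ifs with hlt
      · have h2 : decide (c + ((((rest.takeWhile PySem.Chars.isupper).length : Nat) + 1 : Nat) : Int) > n) = true := by
          rw [decide_eq_true_eq]; push_cast
          have := Int.natCast_nonneg (rest.takeWhile PySem.Chars.isupper).length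
          omega
        rw [h2]; simp
      · rw [ih (c + 1)]
        by_cases ht : List.takeWhile PySem.Chars.isupper rest = []
        · simp only [ht, ne_eq, not_true_eq_false, decide_false, Bool.false_and,
            Bool.false_or, List.length_nil]
          have h2 : decide (c + (((0 + 1 : Nat)) : Int) > n) = false := by
            rw [decide_eq_false_iff_not]; push_cast; omega
          rw [h2]; simp
        · simp only [ht, ne_eq, not_false_eq_true, decide_true, Bool.true_and]
          congr 1
          rw [decide_eq_decide]; push_cast; omega
    · rw [pvALoop]
      simp only [h, Bool.false_eq_true, if_false, List.takeWhile_cons,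
        List.dropWhile_cons, ne_eq, not_true_eq_false, decide_false,
        Bool.false_and, Bool.false_or]
      rw [ih 0]
      simp only [zero_add]
      rw [← pvBLoop_run n rest]
      conv_rhs => rw [pvBLoop.eq_def]
      simp [h]

-- ===== VERDICT (by name: the statement is the Claim_ definition above) =====
theorem has_more_than_consecutive_capitals_spec : Claim_equal_has_more_than_consecutive_capitals := by
  intro s n _
  unfold Spec_has_more_than_consecutive_capitals has_more_than_consecutive_capitals has_more_than_consecutive_capitals_alt
  rw [pvALoop_eq]
  conv_rhs => rw [pvBLoop_run]
  simp only [zero_add]
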